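-- pv_equiv track=rewrite | github.com/JannikNickel/AdventOfCode | 2023/solutions/day11.py | expand_vertical
-- ===== SOURCE A (Python) =====
-- def expand_vertical(points: list[tuple[int, int]], width: int, height: int, expansion: int) -> tuple[list[tuple[int, int]], int, int]:
--     i = 0
--     while i < height:
--         if not any(p[1] == i for p in points):
--             for k, p in enumerate(points):
--                 if p[1] > i:
--                     points[k] = (p[0], p[1] + expansion)
--             i += expansion
--             height += expansion
--         i += 1
--     return points, width, height
-- ===== SOURCE B (Python) =====
-- def expand_vertical(points: list[tuple[int, int]], width: int, height: int, expansion: int) -> tuple[list[tuple[int, int]], int, int]: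
--     occupied = set(y for _, y in points)
--     pref = [0]
--     c = 0
--     for r in range(height):
--         if r not in occupied:
--             c += 1
--         pref.append(c)
--     total = c
--
--     def empties_below(y):
--         if y >= height:
--             return total
--         if y <= 0:
--             return 0
--         return pref[y]
--
--     points[:] = [(x, y + expansion * empties_below(y)) for x, y in points]
--     return points, width, height + expansion * total
-- ===== Notes on version B (the rewrite author's own statement) =====
-- stated objective: faster
-- what changed: Instead of A's while-loop that rescans and shifts every point for each empty grid row, B builds the occupied-row set and a prefix-sum table of empty rows once, then adjusts each point and the height with a single O(1) table lookup. Pre_ excludes negative expansion (unless no row in [0,height) is empty, where the loop never shifts): outside the task's natural domain a negative expansion makes A rescan already-shifted rows and its value there is an accident of the scan order.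
import Mathlib
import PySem

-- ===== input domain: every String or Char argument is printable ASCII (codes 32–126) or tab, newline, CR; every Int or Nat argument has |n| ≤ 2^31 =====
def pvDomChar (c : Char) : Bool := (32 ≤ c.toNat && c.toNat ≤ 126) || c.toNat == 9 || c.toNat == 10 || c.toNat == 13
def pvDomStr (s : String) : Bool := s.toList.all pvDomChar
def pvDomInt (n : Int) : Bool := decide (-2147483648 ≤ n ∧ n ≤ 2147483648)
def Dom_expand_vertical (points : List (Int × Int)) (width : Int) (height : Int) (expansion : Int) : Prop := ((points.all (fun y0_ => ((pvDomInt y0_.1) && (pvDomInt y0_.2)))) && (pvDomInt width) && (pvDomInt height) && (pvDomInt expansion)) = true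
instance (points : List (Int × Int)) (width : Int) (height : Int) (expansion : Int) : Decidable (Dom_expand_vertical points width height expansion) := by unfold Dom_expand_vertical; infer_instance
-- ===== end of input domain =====

-- B replaces A's rescan-and-shift while-loop by a single prefix-sum table of empty rows; both
-- Pythons mutate `points` in place the same way, and the equivalence proved is about the return value.

-- ===== PORT A =====
-- the while-loop: state (points, i, height); returns (points, height).
-- fuel = (height - i).toNat is exactly the number of remaining iterations (each iteration
-- decreases height - i by one, whichever branch is taken), so fuel never runs out.
def evA_go (fuel : Nat) (points : List (Int × Int)) (i : Int) (height : Int) (expansion : Int) :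
    List (Int × Int) × Int :=
  match fuel with
  | 0 => (points, height)
  | fuel + 1 =>
    if i < height then
      if !(points.any (fun p => p.2 == i)) then
        -- for k, p in enumerate(points): if p[1] > i: points[k] = (p[0], p[1] + expansion)
        evA_go fuel (points.map (fun p => if p.2 > i then (p.1, p.2 + expansion) else p))
          (i + expansion + 1) (height + expansion) expansion
      else
        evA_go fuel points (i + 1) height expansion
    else (points, height)

def expand_vertical (points : List (Int × Int)) (width : Int) (height : Int) (expansion : Int) : (List (Int × Int)) × Int × Int :=
  let r := evA_go (height - 0).toNat points 0 height expansion
  (r.1, width, r.2)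

-- ===== PORT B =====
-- loop body: (if r not in occupied: c += 1); pref.append(c)   with state s = (c, pref)
def evB_step (occupied : PySem.Set Int) (s : Int × List Int) (r : Int) : Int × List Int :=
  let c := if PySem.Set.contains occupied r then s.1 else s.1 + 1
  (c, s.2 ++ [c])

-- empties_below(y): total if y >= height, 0 if y <= 0, else pref[y] (always in range there)
def evB_below (height total : Int) (pref : List Int) (y : Int) : Int :=
  if y ≥ height then total
  else if y ≤ 0 then 0
  else PySem.List.pyGetD pref y 0

def expand_vertical_alt (points : List (Int × Int)) (width : Int) (height : Int) (expansion : Int) : (List (Int × Int)) × Int × Int :=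
  let occupied : PySem.Set Int := PySem.Set.ofList (points.map (fun p => p.2))
  let cp := (PySem.List.pyRange 0 height 1).foldl (evB_step occupied) (0, [0])
  let total := cp.1
  let pref := cp.2
  (points.map (fun p => (p.1, p.2 + expansion * evB_below height total pref p.2)), width,
    height + expansion * total)

-- ===== PRECONDITION & SPEC =====
-- Pre_ restricts to the task's natural domain of a nonnegative expansion amount (a negative
-- `expansion` makes A rescan already-shifted rows and its value there is an accident of the scan
-- order), except that with no empty row in [0, height) the loop never shifts and any expansion is
-- fine (the height ≤ len(points) conjunct is implied by 'every row occupied'; it only makes the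
-- condition cheap to decide).
def Pre_expand_vertical (points : List (Int × Int)) (width : Int) (height : Int) (expansion : Int) : Prop :=
  0 ≤ expansion ∨ (height ≤ (points.length : Int) ∧ ∀ r ∈ PySem.List.pyRange 0 height 1, ∃ p ∈ points, p.2 = r)
instance (points : List (Int × Int)) (width : Int) (height : Int) (expansion : Int) : Decidable (Pre_expand_vertical points width height expansion) := by unfold Pre_expand_vertical; infer_instance

def pvWitness_expand_vertical : (List (Int × Int)) × Int × Int × Int := ([(0, 0), (1, 2)], 5, 4, 3)

def Spec_expand_vertical (points : List (Int × Int)) (width : Int) (height : Int) (expansion : Int) (out : (List (Int × Int)) × Int × Int) : Prop := out = expand_vertical_alt points width height expansion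
instance (points : List (Int × Int)) (width : Int) (height : Int) (expansion : Int) (out : (List (Int × Int)) × Int × Int) : Decidable (Spec_expand_vertical points width height expansion out) := by unfold Spec_expand_vertical; infer_instance

-- ===== CLAIM (what is proved, stated in full; the proofs are below) =====
def Claim_equal_expand_vertical : Prop := ∀ (points : List (Int × Int)) (width : Int) (height : Int) (expansion : Int), Dom_expand_vertical points width height expansion → Pre_expand_vertical points width height expansion → Spec_expand_vertical points width height expansion (expand_vertical points width height expansion)

-- ===== LEMMAS AND PROOFS =====

-- row r currently holds no point
def rowEmpty (points : List (Int × Int)) (r : Int) : Bool := !(points.any (fun p => p.2 == r))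

-- number of empty rows r with a ≤ r < b and r < y
def cnt (points : List (Int × Int)) (a b y : Int) : Int :=
  if a < b then (if a < y ∧ rowEmpty points a then 1 else 0) + cnt points (a + 1) b y
  else 0
termination_by (b - a).toNat
decreasing_by omega

theorem cnt_of_not_lt (points : List (Int × Int)) {a b : Int} (y : Int) (h : ¬ a < b) :
    cnt points a b y = 0 := by rw [cnt]; simp [h]

theorem cnt_pos (points : List (Int × Int)) {a b : Int} (y : Int) (h : a < b) :
    cnt points a b y = (if a < y ∧ rowEmpty points a then 1 else 0) + cnt points (a + 1) b y := by
  conv_lhs => rw [cnt]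
  rw [if_pos h]

theorem cnt_of_le (points : List (Int × Int)) {a : Int} (b : Int) {y : Int} (h : y ≤ a) :
    cnt points a b y = 0 := by
  by_cases hab : a < b
  · rw [cnt_pos points y hab, cnt_of_le points b (by omega)]
    have : ¬ (a < y ∧ rowEmpty points a) := by rintro ⟨h1, -⟩; omega
    simp [this]
  · exact cnt_of_not_lt points y hab
termination_by (b - a).toNat
decreasing_by omega

theorem cnt_clamp_high (points : List (Int × Int)) {a b y : Int} (h : b ≤ y) :
    cnt points a b y = cnt points a b b := by
  by_cases hab : a < b
  · rw [cnt_pos points y hab, cnt_pos points b hab, cnt_clamp_high points h]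
    have h1 : a < y := by omega
    simp [h1, hab]
  · rw [cnt_of_not_lt points y hab, cnt_of_not_lt points b hab]
termination_by (b - a).toNat
decreasing_by omega

theorem cnt_clamp_mid (points : List (Int × Int)) {a b y : Int} (h : y ≤ b) :
    cnt points a b y = cnt points a y y := by
  by_cases hab : a < b
  · by_cases hay : a < y
    · rw [cnt_pos points y hab, cnt_pos points y hay, cnt_clamp_mid points h]
    · rw [cnt_of_le points b (by omega), cnt_of_le points y (by omega)]
  · rw [cnt_of_not_lt points y hab, cnt_of_le points y (by omega)]
termination_by (b - a).toNat
decreasing_by omega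

theorem rowEmpty_shift (points : List (Int × Int)) {i r exp : Int} (hi : i < r) (he : 0 ≤ exp) :
    rowEmpty (points.map (fun p => if p.2 > i then (p.1, p.2 + exp) else p)) (r + exp)
      = rowEmpty points r := by
  unfold rowEmpty
  rw [List.any_map]
  have hfun : ((fun p => p.2 == r + exp) ∘ fun (p : Int × Int) => if p.2 > i then (p.1, p.2 + exp) else p)
      = fun p => p.2 == r := by
    funext p
    by_cases hp : p.2 > i
    · simp [hp]
    · simp only [Function.comp]
      rw [if_neg hp]
      have h1 : (p.2 == r + exp) = false := by simp; omega
      have h2 : (p.2 == r) = false := by simp; omega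
      rw [h1, h2]
  rw [hfun]

theorem cnt_shift (points : List (Int × Int)) {i exp : Int} (he : 0 ≤ exp)
    {a b y : Int} (ha : i < a) (hy : i < y) :
    cnt (points.map (fun p => if p.2 > i then (p.1, p.2 + exp) else p)) (a + exp) (b + exp) (y + exp)
      = cnt points a b y := by
  by_cases hab : a < b
  · rw [cnt_pos _ _ (by omega : a + exp < b + exp), cnt_pos points y hab,
      rowEmpty_shift points ha he]
    have h2 : a + exp + 1 = (a + 1) + exp := by ring
    rw [h2, cnt_shift points he (by omega) hy]
    have h1 : (a + exp < y + exp) ↔ (a < y) := by omega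
    simp [h1]
  · rw [cnt_of_not_lt _ _ (by omega : ¬ a + exp < b + exp), cnt_of_not_lt points y hab]
termination_by (b - a).toNat
decreasing_by omega

-- characterization of A's while-loop
theorem evA_go_eq (fuel : Nat) (points : List (Int × Int)) (i height exp : Int)
    (hf : (height - i).toNat ≤ fuel)
    (H : 0 ≤ exp ∨ ∀ r : Int, i ≤ r → r < height → rowEmpty points r = false) :
    evA_go fuel points i height exp =
      (points.map (fun p => (p.1, p.2 + exp * cnt points i height p.2)),
        height + exp * cnt points i height height) := by
  induction fuel generalizing points i height with
  | zero =>
    have hih : ¬ i < height := by omega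
    unfold evA_go
    have hz : ∀ y : Int, cnt points i height y = 0 := fun y => cnt_of_not_lt points y hih
    simp [hz]
  | succ fuel ih =>
    unfold evA_go
    by_cases hih : i < height
    · rw [if_pos hih]
      by_cases hocc : points.any (fun p => p.2 == i)
      · -- row i occupied
        rw [hocc]
        simp only [Bool.not_true, Bool.false_eq_true, if_false]
        have hre : rowEmpty points i = false := by unfold rowEmpty; rw [hocc]; rfl
        have hcnt : ∀ y : Int, cnt points i height y = cnt points (i + 1) height y := by
          intro y
          rw [cnt_pos points y hih, hre]
          simp
        rw [ih points (i + 1) height (by omega)]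
        · rw [hcnt height]
          congr 1
          apply List.map_congr_left
          intro p _
          rw [hcnt p.2]
        · rcases H with H | H
          · exact Or.inl H
          · exact Or.inr (fun r h1 h2 => H r (by omega) h2)
      · -- row i empty
        rw [Bool.not_eq_true] at hocc
        rw [hocc]
        simp only [Bool.not_false, if_true]
        have hre : rowEmpty points i = true := by unfold rowEmpty; rw [hocc]; rfl
        have he : 0 ≤ exp := by
          rcases H with H | H
          · exact H
          · exact absurd (H i (le_refl i) hih) (by rw [hre]; simp)
        rw [ih _ (i + exp + 1) (height + exp) (by omega) (Or.inl he)]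
        have hcnt1 : ∀ y : Int, i < y →
            cnt points i height y = 1 + cnt points (i + 1) height y := by
          intro y hy
          rw [cnt_pos points y hih, if_pos ⟨hy, hre⟩]
        apply Prod.ext
        · rw [List.map_map]
          apply List.map_congr_left
          intro p _
          simp only [Function.comp]
          by_cases hp : p.2 > i
          · rw [if_pos hp]
            have h2 : i + exp + 1 = (i + 1) + exp := by ring
            rw [h2, cnt_shift points he (by omega) hp, hcnt1 p.2 hp]
            have : p.2 + exp + exp * cnt points (i + 1) height p.2
                = p.2 + exp * (1 + cnt points (i + 1) height p.2) := by ring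
            rw [this]
          · rw [if_neg hp]
            rw [cnt_of_le points height (by omega : p.2 ≤ i),
              cnt_of_le _ (height + exp) (by omega : p.2 ≤ i + exp + 1)]
        · have h2 : i + exp + 1 = (i + 1) + exp := by ring
          rw [h2, cnt_shift points he (by omega) hih, hcnt1 height hih]
          ring
    · rw [if_neg hih]
      have hz : ∀ y : Int, cnt points i height y = 0 := fun y => cnt_of_not_lt points y hih
      simp [hz]

-- ---- B side ----

-- ---- B side ----

theorem occupied_contains (points : List (Int × Int)) (r : Int) :
    PySem.Set.contains (PySem.Set.ofList (points.map (fun p => p.2))) r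
      = !(rowEmpty points r) := by
  unfold rowEmpty
  simp only [Bool.not_not]
  rcases h : points.any (fun p => p.2 == r) with _ | _
  · simp only [List.any_eq_false, beq_iff_eq] at h
    have : r ∉ PySem.Set.ofList (points.map (fun p => p.2)) := by
      rw [PySem.Set.mem_ofList]
      simp only [List.mem_map]
      rintro ⟨p, hp, hpr⟩
      exact h p hp hpr
    simpa using (fun hc => this ((PySem.Set.contains_iff _ _).mp hc))
  · simp only [List.any_eq_true, beq_iff_eq] at h
    obtain ⟨p, hp, hpr⟩ := h
    have : r ∈ PySem.Set.ofList (points.map (fun p => p.2)) := by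
      rw [PySem.Set.mem_ofList]
      exact List.mem_map.mpr ⟨p, hp, hpr⟩
    simpa using (PySem.Set.contains_iff _ _).mpr this

-- appending one row on the right
theorem cnt_snoc (points : List (Int × Int)) {a b : Int} (y : Int) (h : a ≤ b) :
    cnt points a (b + 1) y = cnt points a b y + (if b < y ∧ rowEmpty points b then 1 else 0) := by
  by_cases hab : a < b
  · rw [cnt_pos points y (by omega : a < b + 1), cnt_pos points y hab,
      cnt_snoc points y (by omega : a + 1 ≤ b)]
    ring
  · have hae : a = b := by omega
    subst hae
    rw [cnt_pos points y (by omega : a < a + 1),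
      cnt_of_not_lt points y (by omega : ¬ a + 1 < a + 1),
      cnt_of_not_lt points y (by omega : ¬ a < a)]
    ring
termination_by (b - a).toNat
decreasing_by omega

-- the pref-building fold: total is the number of empty rows in [0, n) and pref[k] that in [0, k)
theorem fold_pref (points : List (Int × Int)) (n : Nat) :
    (PySem.List.pyRange 0 (n : Int) 1).foldl
        (evB_step (PySem.Set.ofList (points.map (fun p => p.2)))) ((0 : Int), [(0 : Int)])
      = (cnt points 0 (n : Int) (n : Int),
         (PySem.List.pyRange 0 ((n : Int) + 1) 1).map (fun k => cnt points 0 k k)) := by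
  induction n with
  | zero =>
    rw [show ((0 : Nat) : Int) = (0 : Int) by simp]
    rw [PySem.List.pyRange_one_eq_nil (by omega : (0 : Int) ≤ 0)]
    rw [show (0 : Int) + 1 = 0 + 1 by ring, PySem.List.pyRange_one_singleton]
    rw [cnt_of_not_lt points 0 (by omega : ¬ (0 : Int) < 0)]
    simp [cnt_of_not_lt points 0 (by omega : ¬ (0 : Int) < 0)]
  | succ m ih =>
    have h0m : (0 : Int) ≤ (m : Int) := by exact_mod_cast Nat.zero_le m
    have hcast : ((m + 1 : Nat) : Int) = (m : Int) + 1 := by push_cast; ring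
    rw [hcast, PySem.List.pyRange_one_succ_right h0m, List.foldl_append, ih]
    simp only [List.foldl_cons, List.foldl_nil]
    have hsnoc : cnt points 0 ((m : Int) + 1) ((m : Int) + 1)
        = cnt points 0 (m : Int) (m : Int) + (if rowEmpty points (m : Int) then 1 else 0) := by
      rw [cnt_snoc points _ h0m, cnt_clamp_high points (by omega : (m : Int) ≤ (m : Int) + 1)]
      congr 1
      simp [show (m : Int) < (m : Int) + 1 by omega]
    have hmap : (PySem.List.pyRange 0 ((m : Int) + 1 + 1) 1).map (fun k => cnt points 0 k k)
        = (PySem.List.pyRange 0 ((m : Int) + 1) 1).map (fun k => cnt points 0 k k)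
          ++ [cnt points 0 ((m : Int) + 1) ((m : Int) + 1)] := by
      rw [PySem.List.pyRange_one_succ_right (by omega : (0 : Int) ≤ (m : Int) + 1),
        List.map_append]
      simp
    rw [hmap, hsnoc]
    rw [evB_step, occupied_contains points (m : Int)]
    by_cases he : rowEmpty points (m : Int) <;> simp [he]

-- B's clamped table lookup computes cnt
theorem below_eq_cnt (points : List (Int × Int)) (n : Nat) (y : Int) :
    evB_below (n : Int) (cnt points 0 (n : Int) (n : Int))
        ((PySem.List.pyRange 0 ((n : Int) + 1) 1).map (fun k => cnt points 0 k k)) y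
      = cnt points 0 (n : Int) y := by
  unfold evB_below
  by_cases h1 : y ≥ (n : Int)
  · rw [if_pos h1, cnt_clamp_high points h1]
  · rw [if_neg h1]
    by_cases h2 : y ≤ 0
    · rw [if_pos h2, cnt_of_le points (n : Int) h2]
    · rw [if_neg h2]
      rw [PySem.List.pyGetD_map_pyRange_of_nonneg (fun k => cnt points 0 k k) ((n : Int) + 1) y 0
        (by omega) (by omega)]
      rw [cnt_clamp_mid points (by omega : y ≤ (n : Int))]

-- ===== VERDICT (by name: the statement is the Claim_ definition above) =====
theorem expand_vertical_spec : Claim_equal_expand_vertical := by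
  intro points width height exp hdom hpre
  unfold Spec_expand_vertical
  simp only [expand_vertical, expand_vertical_alt]
  have H : 0 ≤ exp ∨ ∀ r : Int, 0 ≤ r → r < height → rowEmpty points r = false := by
    rcases hpre with h | ⟨-, h⟩
    · exact Or.inl h
    · refine Or.inr fun r h1 h2 => ?_
      obtain ⟨p, hp, hpr⟩ := h r (PySem.List.mem_pyRange_one.mpr ⟨h1, h2⟩)
      have hany : points.any (fun p => p.2 == r) = true :=
        List.any_eq_true.mpr ⟨p, hp, by simp [hpr]⟩
      unfold rowEmpty
      rw [hany]
      rfl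
  rw [evA_go_eq (height - 0).toNat points 0 height exp (by omega) H]
  by_cases hh : 0 ≤ height
  · obtain ⟨n, hn⟩ : ∃ n : Nat, height = (n : Int) := ⟨height.toNat, (Int.toNat_of_nonneg hh).symm⟩
    subst hn
    rw [fold_pref points n]
    simp only
    apply Prod.ext
    · simp only
      apply List.map_congr_left
      intro p _
      rw [below_eq_cnt points n p.2]
    · rfl
  · rw [PySem.List.pyRange_one_eq_nil (by omega : height ≤ 0)]
    simp only [List.foldl_nil]
    have hz : ∀ y : Int, cnt points 0 height y = 0 :=
      fun y => cnt_of_not_lt points y (by omega)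
    have hb : ∀ y : Int, evB_below height 0 [0] y = 0 := by
      intro y
      unfold evB_below
      by_cases h1 : y ≥ height
      · rw [if_pos h1]
      · rw [if_neg h1, if_pos (by omega : y ≤ 0)]
    apply Prod.ext
    · simp only
      apply List.map_congr_left
      intro p _
      rw [hz p.2, hb p.2]
    · simp [hz height]
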